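-- pv_equiv track=rewrite | github.com/iskysun96/monthly-dev-newsletter | src/generator/changelog_renderer.py | group_by_repo
-- ===== SOURCE A (Python) =====
-- from collections import defaultdict
-- from typing import Any
--
-- def group_by_repo(items: list[dict[str, Any]]) -> dict[str, list[dict[str, Any]]]:
--     """Group items by repo name, sorted alphabetically by repo."""
--     groups: dict[str, list[dict[str, Any]]] = defaultdict(list)
--     for item in items:
--         repo = item.get("repo", "unknown")
--         groups[repo].append(item)
--
--     # Sort items within each repo by date descending
--     for repo_items in groups.values():
--         repo_items.sort(key=lambda x: x.get("date", ""), reverse=True)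
--
--     return dict(sorted(groups.items()))
-- ===== SOURCE B (Python) =====
-- def group_by_repo(items):
--     """Group items by repo name, sorted alphabetically by repo."""
--     repos = sorted({item.get("repo", "unknown") for item in items})
--     return {
--         repo: sorted(
--             (item for item in items if item.get("repo", "unknown") == repo),
--             key=lambda x: x.get("date", ""),
--             reverse=True,
--         )
--         for repo in repos
--     }
-- ===== Notes on version B (the rewrite author's own statement) =====
-- stated objective: simpler
-- what changed: A builds a defaultdict grouping pass, sorts each group's list in place, then sorts the dict's items; B instead sorts the set of repo names once and builds the result dict directly with one filtered, date-descending sort per repo.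
import Mathlib
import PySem

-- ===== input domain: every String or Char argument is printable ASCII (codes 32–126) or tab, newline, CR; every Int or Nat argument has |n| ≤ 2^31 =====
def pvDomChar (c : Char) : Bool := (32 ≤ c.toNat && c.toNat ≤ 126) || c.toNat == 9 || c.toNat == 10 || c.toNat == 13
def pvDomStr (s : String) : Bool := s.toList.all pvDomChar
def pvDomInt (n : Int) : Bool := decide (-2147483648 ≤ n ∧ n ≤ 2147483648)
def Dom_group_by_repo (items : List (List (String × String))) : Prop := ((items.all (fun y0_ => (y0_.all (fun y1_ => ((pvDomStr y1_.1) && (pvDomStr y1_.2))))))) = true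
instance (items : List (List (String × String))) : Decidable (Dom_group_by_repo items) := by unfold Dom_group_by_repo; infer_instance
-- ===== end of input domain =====

-- B replaces A's dict-grouping pass + per-group in-place sorts + final items() sort by one sorted set
-- of repo names with a per-repo filtered sort (objective: simpler decomposition; no speed claim).


-- item.get("repo", "unknown") / item.get("date", ""): each item is a Python dict, built from its pair
-- list with later duplicate keys overwriting (PySem.Dict.ofList), then looked up with a default.
def pvRepo (it : List (String × String)) : String := (PySem.Dict.ofList it).getD "repo" "unknown"

def pvDate (it : List (String × String)) : String := (PySem.Dict.ofList it).getD "date" ""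

-- ===== PORT A =====
def group_by_repo (items : List (List (String × String))) : List (String × List (List (String × String))) :=
  -- groups = defaultdict(list); for item in items: groups[item.get("repo","unknown")].append(item)
  let groups := items.foldl (fun d it => d.modify (pvRepo it) [] (fun l => l ++ [it])) PySem.Dict.empty
  -- for repo_items in groups.values(): repo_items.sort(key=lambda x: x.get("date",""), reverse=True)
  let groups2 := PySem.Dict.mk (groups.items.map (fun p => (p.1, PySem.List.sorted p.2 pvDate true)))
  -- dict(sorted(groups.items())): dict keys are distinct, so Python's tuple comparison never reads the
  -- second component (key = fst is exact wherever the Python returns), and dict() of those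
  -- key-distinct sorted pairs is that same association list.
  PySem.List.sorted groups2.items (fun p => p.1) false

-- ===== PORT B =====
def group_by_repo_alt (items : List (List (String × String))) : List (String × List (List (String × String))) :=
  -- repos = sorted({item.get("repo","unknown") for item in items})
  let repos := PySem.List.sorted (PySem.Set.ofList (items.map pvRepo)) (fun r => r) false
  -- {repo: sorted((item for item in items if … == repo), key=…, reverse=True) for repo in repos}
  repos.map (fun r => (r, PySem.List.sorted (items.filter (fun it => pvRepo it == r)) pvDate true))

-- ===== PRECONDITION & SPEC =====
def Spec_group_by_repo (items : List (List (String × String))) (out : List (String × List (List (String × String)))) : Prop := out = group_by_repo_alt items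
instance (items : List (List (String × String))) (out : List (String × List (List (String × String)))) : Decidable (Spec_group_by_repo items out) := by unfold Spec_group_by_repo; infer_instance

-- ===== CLAIM (what is proved, stated in full; the proofs are below) =====
def Claim_equal_group_by_repo : Prop := ∀ (items : List (List (String × String))), Dom_group_by_repo items → Spec_group_by_repo items (group_by_repo items)

-- ===== LEMMAS AND PROOFS =====

-- A's grouping loop, characterised: its items are the first-occurrence repo names, each paired with
-- the sublist of items carrying that repo.
theorem pv_groups_items (items : List (List (String × String))) :
    (items.foldl (fun d it => d.modify (pvRepo it) [] (fun l => l ++ [it])) PySem.Dict.empty).items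
      = (PySem.Set.ofList (items.map pvRepo)).map
          (fun r => (r, items.filter (fun it => pvRepo it == r))) := by
  have hfold : items.foldl (fun d it => d.modify (pvRepo it) [] (fun l => l ++ [it]))
      (PySem.Dict.empty : PySem.Dict String (List (List (String × String))))
      = (items.map (fun it => (pvRepo it, it))).foldl
          (fun d p => d.modify p.1 [] (fun l => l ++ [p.2])) PySem.Dict.empty := by
    rw [List.foldl_map]
  have hnd : (items.foldl (fun d it => d.modify (pvRepo it) [] (fun l => l ++ [it]))
      (PySem.Dict.empty : PySem.Dict String (List (List (String × String))))).keys.Nodup :=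
    PySem.Dict.nodup_keys_foldl_modify_key items pvRepo [] (fun _ it l => l ++ [it]) _ PySem.Dict.nodup_keys_empty
  have hkeys : (items.foldl (fun d it => d.modify (pvRepo it) [] (fun l => l ++ [it]))
      (PySem.Dict.empty : PySem.Dict String (List (List (String × String))))).keys
      = PySem.Set.ofList (items.map pvRepo) := by
    rw [PySem.Dict.keys_foldl_modify_key]
    simp [PySem.Set.update, PySem.Set.ofList]
  have hget : ∀ r, (items.foldl (fun d it => d.modify (pvRepo it) [] (fun l => l ++ [it]))
      (PySem.Dict.empty : PySem.Dict String (List (List (String × String))))).getD r []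
      = items.filter (fun it => pvRepo it == r) := by
    intro r
    rw [hfold, PySem.Dict.getD_foldl_modify_append]
    simp [List.filter_map, Function.comp_def]
  rw [PySem.Dict.items_eq_map_keys _ hnd [], hkeys]
  exact List.map_congr_left (fun r _ => by rw [hget r])

-- A = sorted-by-fst of a key-distinct pair list; naming B's list as the strictly key-increasing
-- rearrangement closes the claim.
theorem pv_main (items : List (List (String × String))) :
    group_by_repo items = group_by_repo_alt items := by
  unfold group_by_repo group_by_repo_alt
  simp only [pv_groups_items, List.map_map]
  apply PySem.List.sorted_eq_of_perm_of_pairwise_lt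
  · exact (PySem.List.sorted_perm _ _ _).map _
  · rw [List.pairwise_map]
    exact (PySem.List.sorted_ofList_pairwise_lt (items.map pvRepo)).imp (fun h => h)

-- ===== VERDICT (by name: the statement is the Claim_ definition above) =====
theorem group_by_repo_spec : Claim_equal_group_by_repo := by
  intro items _
  unfold Spec_group_by_repo
  exact pv_main items
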